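-- pv_equiv track=rewrite | github.com/UWPCE-PythonCert-ClassRepos/Self_Paced-Online | students/mkdir01/lesson04/Trigram_Kata.py | seperate_words
-- ===== SOURCE A (Python) =====
-- def seperate_words(temp_file):
--     temp_chars = list(temp_file)
--     # break apart at " ", do not break at "-", turn "--" into a comma, remove "\n", "at" != "at."
--     for i, char in enumerate(temp_chars):
--         if char == "-":  # turn "--" into ","
--             if temp_chars[i + 1] == "-":
--                 temp_chars[i] = ", "
--                 temp_chars.pop(i + 1)  # and pop() second dash
--         elif char == "\n":
--             temp_chars[i] = " "
--         elif char == '':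
--             temp_chars[i] = " "
--         elif char == '\"':
--             if temp_chars[i + 1] == "\\":
--                 temp_chars[i] = " "
--                 temp_chars.pop(i + 1)
--
--     return "".join(temp_chars).split(" ")  # turn into a list of words
-- ===== SOURCE B (Python) =====
-- def seperate_words(temp_file):
--     # Single forward pass over the string: emit pieces, skipping the second
--     # character of a matched "--" or "\"\\" pair; then join and split on " ".
--     out = []
--     i = 0
--     n = len(temp_file)
--     while i < n:
--         c = temp_file[i]
--         if c == '-' and i + 1 < n and temp_file[i + 1] == '-':
--             out.append(", ")
--             i += 2
--         elif c == '"' and i + 1 < n and temp_file[i + 1] == '\\':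
--             out.append(" ")
--             i += 2
--         elif c == '\n':
--             out.append(" ")
--             i += 1
--         else:
--             out.append(c)
--             i += 1
--     return "".join(out).split(" ")
-- ===== Notes on version B (the rewrite author's own statement) =====
-- stated objective: alternative
-- what changed: Replaces A's in-place mutation of a char list (index writes plus pop() inside an enumerate loop, which shifts the tail on every pop) by a single non-mutating forward pass that emits output pieces and skips the second character of a matched pair; Pre_ excludes exactly the inputs (ending in '"' or an odd run of '-') where A's lookahead temp_chars[i+1] raises IndexError.
-- outside the precondition, e.g. on seperate_words('"'): A raises IndexError, B returns ['"']; on seperate_words('-'): A raises IndexError, B returns ['-']; on seperate_words('a-'): A raises IndexError, B returns ['a-']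
import Mathlib
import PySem

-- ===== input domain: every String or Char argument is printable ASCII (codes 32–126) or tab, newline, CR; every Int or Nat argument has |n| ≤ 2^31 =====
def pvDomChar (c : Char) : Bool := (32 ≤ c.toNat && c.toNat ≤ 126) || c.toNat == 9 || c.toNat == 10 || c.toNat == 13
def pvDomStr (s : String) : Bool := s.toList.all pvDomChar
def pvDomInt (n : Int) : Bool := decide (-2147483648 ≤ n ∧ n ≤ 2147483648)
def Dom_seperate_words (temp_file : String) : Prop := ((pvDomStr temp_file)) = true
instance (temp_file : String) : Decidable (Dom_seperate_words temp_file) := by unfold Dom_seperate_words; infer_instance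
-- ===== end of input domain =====

-- B replaces A's in-place mutation of the char list (index writes and pop() under an
-- enumerate loop) by a single non-mutating forward pass that skips the second char of
-- a matched "--" or quote-backslash pair (objective: alternative; A mutates only a
-- local copy, so no caller-visible side effect is involved).

-- ===== PORT A =====
-- A's enumerate loop over the mutating list temp_chars: index i, current list l;
-- the two `| none => l` arms are where Python raises IndexError (excluded by Pre_).
def aLoop (l : List String) (i : Nat) : List String :=
  if h : i < l.length then
    let c := l[i]
    if c = "-" then
      match l[i + 1]? with
      | some d =>
        if d = "-" then aLoop ((l.set i ", ").eraseIdx (i + 1)) (i + 1)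
        else aLoop l (i + 1)
      | none => l
    else if c = "\n" then aLoop (l.set i " ") (i + 1)
    else if c = "" then aLoop (l.set i " ") (i + 1)
    else if c = "\"" then
      match l[i + 1]? with
      | some d =>
        if d = "\\" then aLoop ((l.set i " ").eraseIdx (i + 1)) (i + 1)
        else aLoop l (i + 1)
      | none => l
    else aLoop l (i + 1)
  else l
termination_by l.length - i
decreasing_by
  all_goals (try simp only [List.length_eraseIdx, List.length_set])
  all_goals (try split)
  all_goals omega

def seperate_words (temp_file : String) : List String :=
  (PySem.Str.split? (PySem.Str.join "" (aLoop (temp_file.toList.map Char.toString) 0)) " ").getD []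

-- ===== PORT B =====
-- B's while loop: one forward pass, consuming two chars on a matched pair.

def bLoop : List Char → List String
  | [] => []
  | [c] => if c = '\n' then [" "] else [c.toString]
  | c :: d :: rest =>
    if c = '-' ∧ d = '-' then ", " :: bLoop rest
    else if c = '"' ∧ d = '\\' then " " :: bLoop rest
    else if c = '\n' then " " :: bLoop (d :: rest)
    else c.toString :: bLoop (d :: rest)

def seperate_words_alt (temp_file : String) : List String :=
  (PySem.Str.split? (PySem.Str.join "" (bLoop temp_file.toList)) " ").getD []

-- ===== PRECONDITION & SPEC =====
-- Pre_ excludes exactly the inputs on which A raises IndexError (the lookahead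
-- temp_chars[i+1] runs past the end): strings ending in '"' or in an odd-length run of '-'.
def Pre_seperate_words (temp_file : String) : Prop :=
  temp_file.toList.getLast? ≠ some '"' ∧
  (temp_file.toList.getLast? = some '-' →
    (temp_file.toList.reverse.takeWhile (· == '-')).length % 2 = 0)
instance (temp_file : String) : Decidable (Pre_seperate_words temp_file) := by
  unfold Pre_seperate_words; infer_instance
def pvWitness_seperate_words : String := "one--two\nthree"

def Spec_seperate_words (temp_file : String) (out : List String) : Prop := out = seperate_words_alt temp_file
instance (temp_file : String) (out : List String) : Decidable (Spec_seperate_words temp_file out) := by unfold Spec_seperate_words; infer_instance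

-- ===== CLAIM (what is proved, stated in full; the proofs are below) =====
def Claim_equal_seperate_words : Prop := ∀ (temp_file : String), Dom_seperate_words temp_file → Pre_seperate_words temp_file → Spec_seperate_words temp_file (seperate_words temp_file)
-- ===== LEMMAS AND PROOFS =====

-- the recursive no-IndexError condition of A's scan (proof-side only)
def aOk : List Char → Bool
  | [] => true
  | [c] => !(c = '-' ∨ c = '"')
  | c :: d :: rest =>
    if c = '-' ∧ d = '-' then aOk rest
    else if c = '"' ∧ d = '\\' then aOk rest
    else aOk (d :: rest)


lemma toString_eq_iff (c d : Char) : Char.toString c = Char.toString d ↔ c = d := by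
  constructor
  · intro h; have := congrArg String.toList h; simpa [Char.toString] using this
  · intro h; rw [h]

lemma toString_ne_empty (c : Char) : Char.toString c ≠ "" := by
  intro h; have := congrArg String.toList h; simp [Char.toString] at this

lemma getElem_append_len (out : List String) (x : String) (xs : List String)
    (h : out.length < (out ++ x :: xs).length) : (out ++ x :: xs)[out.length]'h = x := by
  rw [List.getElem_append_right (by omega)]; simp

lemma getElem?_append_len_succ (out : List String) (x y : String) (xs : List String) :
    (out ++ x :: y :: xs)[out.length + 1]? = some y := by
  rw [List.getElem?_append_right (by omega)]; simp

lemma set_append_len (out : List String) (x v : String) (xs : List String) :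
    (out ++ x :: xs).set out.length v = out ++ v :: xs := by
  rw [List.set_append]; simp

lemma erase_append_len_succ (out : List String) (x y : String) (xs : List String) :
    (out ++ x :: y :: xs).eraseIdx (out.length + 1) = out ++ x :: xs := by
  rw [List.eraseIdx_append_of_length_le (by simp)]; simp

lemma aLoop_stop (out : List String) : aLoop out out.length = out := by
  rw [aLoop]; simp

lemma aLoop_eq (rest : List Char) : ∀ out : List String, aOk rest = true →
    aLoop (out ++ rest.map Char.toString) out.length = out ++ bLoop rest := by
  induction rest using bLoop.induct with
  | case1 => intro out _; simpa [bLoop] using aLoop_stop out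
  | case2 =>
    intro out _
    rw [aLoop, dif_pos (by simp)]
    simp only [List.map_cons, List.map_nil, getElem_append_len, set_append_len, bLoop]
    rw [if_neg (by decide), if_pos (by decide)]
    simpa using aLoop_stop (out ++ [" "])
  | case3 c hc =>
    intro out hok
    simp [aOk] at hok
    rw [aLoop, dif_pos (by simp)]
    simp only [List.map_cons, List.map_nil, getElem_append_len, set_append_len, bLoop]
    rw [if_neg (by rw [show ("-" : String) = Char.toString '-' from rfl, toString_eq_iff]; exact hok.1)]
    rw [if_neg (by rw [show ("\n" : String) = Char.toString '\n' from rfl, toString_eq_iff]; exact hc)]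
    rw [if_neg (toString_ne_empty c)]
    rw [if_neg (by rw [show ("\"" : String) = Char.toString '"' from rfl, toString_eq_iff]; exact hok.2)]
    rw [if_neg hc]
    simpa using aLoop_stop (out ++ [Char.toString c])
  | case4 c d rest h ih =>
    intro out hok
    obtain ⟨rfl, rfl⟩ := h
    have hok' : aOk rest = true := by simpa [aOk] using hok
    rw [aLoop, dif_pos (by simp)]
    simp only [List.map_cons, getElem_append_len, getElem?_append_len_succ,
      set_append_len, erase_append_len_succ, bLoop]
    rw [if_pos (by decide), if_pos (by decide), if_pos (by decide)]
    simpa using ih (out ++ [", "]) hok'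
  | case5 c d rest h1 h2 ih =>
    intro out hok
    obtain ⟨rfl, rfl⟩ := h2
    have hok' : aOk rest = true := by simpa [aOk, h1] using hok
    rw [aLoop, dif_pos (by simp)]
    simp only [List.map_cons, getElem_append_len, getElem?_append_len_succ,
      set_append_len, erase_append_len_succ, bLoop]
    rw [if_neg (by decide), if_neg (by decide), if_neg (by decide), if_pos (by decide),
      if_pos (by decide), if_neg h1]
    simpa using ih (out ++ [" "]) hok'
  | case6 d rest h1 h2 ih =>
    intro out hok
    have hok' : aOk (d :: rest) = true := by
      simp only [aOk] at hok; rwa [if_neg h1, if_neg h2] at hok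
    rw [aLoop, dif_pos (by simp)]
    simp only [List.map_cons, getElem_append_len, set_append_len, bLoop]
    rw [if_neg (by decide), if_pos (by decide), if_neg h1, if_neg h2]
    simpa using ih (out ++ [" "]) hok'
  | case7 c d rest h1 h2 h3 ih =>
    intro out hok
    have hok' : aOk (d :: rest) = true := by
      simp only [aOk] at hok; rwa [if_neg h1, if_neg h2] at hok
    rw [aLoop, dif_pos (by simp)]
    simp only [List.map_cons, getElem_append_len, getElem?_append_len_succ, set_append_len, bLoop]
    rw [if_neg h1, if_neg h2, if_neg h3]
    by_cases hc : c = '-'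
    · subst hc
      have hd : d ≠ '-' := fun hd => h1 ⟨rfl, hd⟩
      rw [if_pos (by decide)]
      rw [if_neg (by rw [show ("-" : String) = Char.toString '-' from rfl, toString_eq_iff]; exact hd)]
      simpa using ih (out ++ ['-'.toString]) hok'
    · by_cases hq : c = '"'
      · subst hq
        have hd : d ≠ '\\' := fun hd => h2 ⟨rfl, hd⟩
        rw [if_neg (by decide), if_neg (by decide), if_neg (by decide), if_pos (by decide)]
        rw [if_neg (by rw [show ("\\" : String) = Char.toString '\\' from rfl, toString_eq_iff]; exact hd)]
        simpa using ih (out ++ ['"'.toString]) hok'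
      · rw [if_neg (by rw [show ("-" : String) = Char.toString '-' from rfl, toString_eq_iff]; exact hc)]
        rw [if_neg (by rw [show ("\n" : String) = Char.toString '\n' from rfl, toString_eq_iff]; exact h3)]
        rw [if_neg (toString_ne_empty c)]
        rw [if_neg (by rw [show ("\"" : String) = Char.toString '"' from rfl, toString_eq_iff]; exact hq)]
        simpa using ih (out ++ [c.toString]) hok'

lemma takeWhile_full {α} (p : α → Bool) (l : List α) (h : (l.takeWhile p).length = l.length) :
    ∀ x ∈ l, p x = true := by
  have := (List.takeWhile_sublist (l := l) (p := p)).eq_of_length h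
  rw [List.takeWhile_eq_self_iff] at this; exact this

lemma pre_ok (l : List Char) (h1 : l.getLast? ≠ some '"')
    (h2 : l.getLast? = some '-' → (l.reverse.takeWhile (· == '-')).length % 2 = 0) :
    aOk l = true := by
  induction l using aOk.induct with
  | case1 => rfl
  | case2 c =>
    have hc1 : c ≠ '"' := by simpa using h1
    have hc2 : c ≠ '-' := by
      intro rfl_h; subst rfl_h
      have := h2 (by simp)
      simp at this
    simp [aOk, hc1, hc2]
  | case3 c d rest h ih =>
    obtain ⟨rfl, rfl⟩ := h
    simp only [aOk]
    rcases rest with _ | ⟨e, t⟩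
    · rfl
    · apply ih
      · rw [List.getLast?_cons_cons, List.getLast?_cons_cons] at h1; exact h1
      · intro hr
        have hl : ('-' :: '-' :: e :: t).getLast? = some '-' := by
          rw [List.getLast?_cons_cons, List.getLast?_cons_cons]; exact hr
        have hrun := h2 hl
        rw [show ('-' :: '-' :: e :: t).reverse = (e :: t).reverse ++ ['-', '-'] by simp] at hrun
        rw [List.takeWhile_append] at hrun
        split_ifs at hrun with hfull
        · simp only [List.length_append,
            show (List.takeWhile (· == '-') ['-', '-']).length = 2 from rfl] at hrun
          have : (List.takeWhile (· == '-') ((e :: t).reverse)).length = (e :: t).reverse.length := hfull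
          omega
        · exact hrun
  | case4 c d rest h1' h ih =>
    obtain ⟨rfl, rfl⟩ := h
    simp only [aOk, if_neg h1']
    rcases rest with _ | ⟨e, t⟩
    · rfl
    · apply ih
      · rw [List.getLast?_cons_cons, List.getLast?_cons_cons] at h1; exact h1
      · intro hr
        have hrun := h2 (by rw [List.getLast?_cons_cons, List.getLast?_cons_cons]; exact hr)
        rw [show ('"' :: '\\' :: e :: t).reverse = (e :: t).reverse ++ ['\\', '"'] by simp] at hrun
        rw [List.takeWhile_append] at hrun
        split_ifs at hrun with hfull
        · simp only [List.length_append] at hrun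
          have heq : (List.takeWhile (· == '-') ((e :: t).reverse)).length = (e :: t).reverse.length := hfull
          rw [heq]
          simpa using hrun
        · exact hrun
  | case5 c d rest h1' h2' ih =>
    -- c consumed alone (the pattern where c is neither pair head); recurse on d :: rest
    simp only [aOk, if_neg h1', if_neg h2']
    apply ih
    · rw [List.getLast?_cons_cons] at h1; exact h1
    · intro hr
      have hrun := h2 (by rw [List.getLast?_cons_cons]; exact hr)
      rw [show (c :: d :: rest).reverse = (d :: rest).reverse ++ [c] by simp] at hrun
      rw [List.takeWhile_append] at hrun
      split_ifs at hrun with hfull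
      · have hall := takeWhile_full _ _ hfull
        have hd : (d == '-') = true := hall d (by simp)
        have hcne : c ≠ '-' := by
          intro rfl_h; subst rfl_h
          exact h1' ⟨rfl, by simpa using hd⟩
        have hcb : (c == '-') = false := by simp [hcne]
        have : List.takeWhile (· == '-') [c] = [] := by
          simp [List.takeWhile, hcb]
        rw [this] at hrun
        have heq : (List.takeWhile (· == '-') ((d :: rest).reverse)).length = (d :: rest).reverse.length := hfull
        rw [heq]
        simpa using hrun
      · exact hrun

-- ===== VERDICT (by name: the statement is the Claim_ definition above) =====
theorem seperate_words_spec : Claim_equal_seperate_words := by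
  intro s _ hpre
  unfold Spec_seperate_words seperate_words seperate_words_alt
  have h := aLoop_eq s.toList [] (pre_ok s.toList hpre.1 hpre.2)
  simpa using congrArg (fun l => (PySem.Str.split? (PySem.Str.join "" l) " ").getD []) h
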